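-- pv_equiv track=rewrite | github.com/AnDreV133/BSTU-labs | at/lab3/lab3_.py | S3
-- ===== SOURCE A (Python) =====
-- def S3(input):
--     _input = input
--     while True:
--         if len(_input) == 0:
--             return -5
--
--         if _input[0] == 'a':
--             _input = _input[1:]
--         elif _input[0] == 'b':
--             return S5(_input[1:])
--         else:
--             return -2
--
-- def S5(input):
--     _input = input
--     while True:
--         if len(_input) == 0:
--             return 0
--
--         if _input[0] == 'a':
--             _input = _input[1:]
--         elif _input[0] == 'b':
--             return -3
--         else:
--             return -2
-- ===== SOURCE B (Python) =====
-- def S3(input):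
--     t = input.lstrip('a')
--     if not t:
--         return -5
--     if t[0] != 'b':
--         return -2
--     u = t[1:].lstrip('a')
--     if not u:
--         return 0
--     return -3 if u[0] == 'b' else -2
-- ===== Notes on version B (the rewrite author's own statement) =====
-- stated objective: idiomatic
-- what changed: Replaces the two hand-run state-machine loops (S3/S5) by direct classification: strip the leading 'a'-run with lstrip, test the next character, then strip the second 'a'-run and test again.
import Mathlib
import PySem

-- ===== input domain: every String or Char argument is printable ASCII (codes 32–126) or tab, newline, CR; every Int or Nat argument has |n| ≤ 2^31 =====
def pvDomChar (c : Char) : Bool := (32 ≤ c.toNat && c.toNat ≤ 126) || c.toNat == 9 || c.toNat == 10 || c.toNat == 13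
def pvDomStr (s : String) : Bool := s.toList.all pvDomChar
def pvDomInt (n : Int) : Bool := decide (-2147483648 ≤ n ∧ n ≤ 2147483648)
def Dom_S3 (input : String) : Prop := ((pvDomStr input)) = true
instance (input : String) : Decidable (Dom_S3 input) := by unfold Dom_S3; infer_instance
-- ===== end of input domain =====

-- B replaces the two state-machine loops by direct classification via lstrip('a'); idiomatic, no speed claim.

-- ===== PORT A =====
-- A's inner state machine S5: while-loop consuming the string one char at a time
def S5go : List Char → Int
  | [] => 0
  | c :: rest => if c = 'a' then S5go rest else if c = 'b' then -3 else -2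

-- A's S3 loop: consume leading chars, dispatch to S5 on 'b'
def S3go : List Char → Int
  | [] => -5
  | c :: rest => if c = 'a' then S3go rest else if c = 'b' then S5go rest else -2

def S3 (input : String) : Int := S3go input.toList

-- ===== PORT B =====
-- Python's s.lstrip('a') (strip the leading run of 'a') is exactly dropWhile (== 'a') on the chars
def S3_alt (input : String) : Int :=
  let t := input.toList.dropWhile (· == 'a')
  match t with
  | [] => -5
  | c :: r =>
    if c ≠ 'b' then -2
    else
      match r.dropWhile (· == 'a') with
      | [] => 0
      | d :: _ => if d = 'b' then -3 else -2

-- ===== PRECONDITION & SPEC =====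
def Spec_S3 (input : String) (out : Int) : Prop := out = S3_alt input
instance (input : String) (out : Int) : Decidable (Spec_S3 input out) := by unfold Spec_S3; infer_instance

-- ===== CLAIM (what is proved, stated in full; the proofs are below) =====
def Claim_equal_S3 : Prop := ∀ (input : String), Dom_S3 input → Spec_S3 input (S3 input)

-- ===== LEMMAS AND PROOFS =====

theorem S5go_eq (l : List Char) :
    S5go l = match l.dropWhile (· == 'a') with
             | [] => 0
             | d :: _ => if d = 'b' then (-3 : Int) else -2 := by
  induction l with
  | nil => simp [S5go, List.dropWhile]
  | cons c rest ih =>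
    rw [List.dropWhile_cons]
    by_cases h : c = 'a'
    · simp [S5go, h, ih]
    · simp [S5go, h]

theorem S3go_eq (l : List Char) :
    S3go l = match l.dropWhile (· == 'a') with
             | [] => (-5 : Int)
             | c :: r =>
               if c ≠ 'b' then -2
               else match r.dropWhile (· == 'a') with
                    | [] => 0
                    | d :: _ => if d = 'b' then -3 else -2 := by
  induction l with
  | nil => simp [S3go, List.dropWhile]
  | cons c rest ih =>
    rw [List.dropWhile_cons]
    by_cases h : c = 'a'
    · simp [S3go, h, ih]
    · by_cases hb : c = 'b' <;> simp [S3go, h, hb, S5go_eq]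

-- ===== VERDICT (by name: the statement is the Claim_ definition above) =====
theorem S3_spec : Claim_equal_S3 := by
  intro input _
  unfold Spec_S3 S3 S3_alt
  exact S3go_eq input.toList
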